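-- pv_equiv track=rewrite | github.com/kahandboo/baekjoon | 프로그래머스/2/49994. 방문 길이/방문 길이.py | solution
-- ===== SOURCE A (Python) =====
-- def solution(dirs):
--     move_dict = {
--         "U" : (0, 1),
--         "D" : (0, -1),
--         "R" : (1, 0),
--         "L" : (-1, 0)
--     }
--     visited = set()
--     position = (0, 0)
--     answer = 0
--
--     for dir in dirs:
--         dx, dy = move_dict[dir]
--         cx, cy = position
--
--         nx = cx + dx
--         ny = cy + dy
--
--         if (nx > 5 or nx < -5 or ny > 5 or ny < -5):
--             continue
--
--         position = (nx, ny)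
--
--         if (cx, cy, nx, ny) in visited or (nx, ny, cx, cy) in visited:
--             continue
--
--         visited.add((cx, cy, nx, ny))
--         visited.add((nx, ny, cx, cy))
--         answer += 1
--
--
--     return answer
-- ===== SOURCE B (Python) =====
-- def solution(dirs):
--     # Phase 1: simulate the walk into a full trajectory (position repeats when a
--     # step would leave the grid). Phase 2: dedup the undirected edges and count.
--     moves = {"U": (0, 1), "D": (0, -1), "R": (1, 0), "L": (-1, 0)}
--     path = [(0, 0)]
--     for d in dirs:
--         x, y = path[-1]
--         dx, dy = moves[d]
--         nx, ny = x + dx, y + dy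
--         path.append((nx, ny) if abs(nx) <= 5 and abs(ny) <= 5 else (x, y))
--     edges = [(p, q) if p <= q else (q, p) for p, q in zip(path, path[1:]) if p != q]
--     return len(set(edges))
-- ===== Notes on version B (the rewrite author's own statement) =====
-- stated objective: alternative
-- what changed: B is staged: it first materialises the whole trajectory as a list of positions (repeating the position on blocked steps), then in a second phase derives the canonical undirected edges from consecutive position pairs and returns the size of their set, instead of A's single pass that interleaves the walk with a two-ordering visited-set membership test, double insertion and a running counter.
import Mathlib
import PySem

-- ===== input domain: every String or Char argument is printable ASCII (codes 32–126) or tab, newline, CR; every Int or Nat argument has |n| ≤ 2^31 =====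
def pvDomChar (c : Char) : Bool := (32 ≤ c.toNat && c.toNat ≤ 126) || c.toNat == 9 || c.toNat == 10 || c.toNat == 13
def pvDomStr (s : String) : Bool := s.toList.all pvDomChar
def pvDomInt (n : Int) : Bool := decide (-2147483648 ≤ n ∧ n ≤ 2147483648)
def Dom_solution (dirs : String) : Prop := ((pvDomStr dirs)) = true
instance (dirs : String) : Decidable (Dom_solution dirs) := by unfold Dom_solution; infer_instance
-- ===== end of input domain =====

-- B is staged: it first builds the whole trajectory as a list of positions, then derives
-- the canonical undirected edges from consecutive pairs and counts their distinct values,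
-- instead of A's single interleaved pass with a two-ordering visited set and a counter.

-- ===== PORT A =====
-- move_dict[dir]: lookup in a 4-entry literal dict; none = KeyError (excluded by Pre_solution)
def moveGet (c : Char) : Option (Int × Int) :=
  if c = 'U' then some (0, 1)
  else if c = 'D' then some (0, -1)
  else if c = 'R' then some (1, 0)
  else if c = 'L' then some (-1, 0)
  else none

def stepA (st : PySem.Set (Int × Int × Int × Int) × (Int × Int) × Int) (c : Char) :
    PySem.Set (Int × Int × Int × Int) × (Int × Int) × Int :=
  match moveGet c with
  | none => st  -- Python raises KeyError here; Pre_solution excludes such inputs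
  | some (dx, dy) =>
    let visited := st.1
    let cx := st.2.1.1
    let cy := st.2.1.2
    let answer := st.2.2
    let nx := cx + dx
    let ny := cy + dy
    if nx > 5 ∨ nx < -5 ∨ ny > 5 ∨ ny < -5 then st
    else if (cx, cy, nx, ny) ∈ visited ∨ (nx, ny, cx, cy) ∈ visited then
      (visited, (nx, ny), answer)
    else
      (PySem.Set.add (PySem.Set.add visited (cx, cy, nx, ny)) (nx, ny, cx, cy),
       (nx, ny), answer + 1)

def solution (dirs : String) : Int :=
  (dirs.toList.foldl stepA (PySem.Set.empty, (0, 0), 0)).2.2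

-- ===== PORT B =====
def moveGetB (c : Char) : Option (Int × Int) :=
  if c = 'U' then some (0, 1)
  else if c = 'D' then some (0, -1)
  else if c = 'R' then some (1, 0)
  else if c = 'L' then some (-1, 0)
  else none

-- Python tuple comparison p <= q is lexicographic
def canonEdge (p q : Int × Int) : (Int × Int) × (Int × Int) :=
  if p.1 < q.1 ∨ (p.1 = q.1 ∧ p.2 ≤ q.2) then (p, q) else (q, p)

-- phase 1 loop body: path[-1] is the last element (path is always nonempty)
def pathStep (path : List (Int × Int)) (c : Char) : List (Int × Int) :=
  match moveGetB c with
  | none => path  -- Python raises KeyError here; Pre_solution excludes such inputs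
  | some (dx, dy) =>
    let p := path.getLastD (0, 0)
    let nx := p.1 + dx
    let ny := p.2 + dy
    path ++ [if |nx| ≤ 5 ∧ |ny| ≤ 5 then (nx, ny) else p]

def solution_alt (dirs : String) : Int :=
  let path := dirs.toList.foldl pathStep [(0, 0)]
  let edges := ((path.zip path.tail).filter (fun e => e.1 ≠ e.2)).map
    (fun e => canonEdge e.1 e.2)
  ((PySem.Set.ofList edges).length : Int)

-- ===== PRECONDITION & SPEC =====
-- Pre_ excludes exactly the inputs containing a character that is not a move key, on which
-- Python A raises KeyError.
def Pre_solution (dirs : String) : Prop :=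
  (dirs.toList.all (fun c => c == 'U' || c == 'D' || c == 'R' || c == 'L')) = true
instance (dirs : String) : Decidable (Pre_solution dirs) := by unfold Pre_solution; infer_instance

def pvWitness_solution : String := "UL"

def Spec_solution (dirs : String) (out : Int) : Prop := out = solution_alt dirs
instance (dirs : String) (out : Int) : Decidable (Spec_solution dirs out) := by unfold Spec_solution; infer_instance

-- ===== CLAIM (what is proved, stated in full; the proofs are below) =====
def Claim_equal_solution : Prop := ∀ (dirs : String), Dom_solution dirs → Pre_solution dirs → Spec_solution dirs (solution dirs)

-- ===== LEMMAS AND PROOFS =====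

lemma canonEdge_comm (p q : Int × Int) : canonEdge p q = canonEdge q p := by
  obtain ⟨a, b⟩ := p; obtain ⟨c, d⟩ := q
  simp only [canonEdge]
  split_ifs <;> simp_all [Prod.ext_iff] <;> omega

lemma canonEdge_eq_iff (r s p q : Int × Int) :
    canonEdge r s = canonEdge p q ↔ (r = p ∧ s = q) ∨ (r = q ∧ s = p) := by
  obtain ⟨a, b⟩ := r; obtain ⟨c, d⟩ := s; obtain ⟨e, f⟩ := p; obtain ⟨g, h⟩ := q
  simp only [canonEdge]
  split_ifs <;> simp_all [Prod.ext_iff] <;> omega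

-- proof-side single-pass over canonical edges, bridging A's pass and B's staged passes
def stepC (st : PySem.Set ((Int × Int) × (Int × Int)) × (Int × Int)) (c : Char) :
    PySem.Set ((Int × Int) × (Int × Int)) × (Int × Int) :=
  match moveGet c with
  | none => st
  | some (dx, dy) =>
    let nx := st.2.1 + dx
    let ny := st.2.2 + dy
    if |nx| ≤ 5 ∧ |ny| ≤ 5 then
      (PySem.Set.add st.1 (canonEdge st.2 (nx, ny)), (nx, ny))
    else st

-- next position and the canonical-edge sequence of the walk from a given position
def nextP (pos : Int × Int) (c : Char) : Int × Int :=
  match moveGet c with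
  | none => pos
  | some (dx, dy) =>
    if |pos.1 + dx| ≤ 5 ∧ |pos.2 + dy| ≤ 5 then (pos.1 + dx, pos.2 + dy) else pos

def edgeSeq (pos : Int × Int) : List Char → List ((Int × Int) × (Int × Int))
  | [] => []
  | c :: l =>
    match moveGet c with
    | none => edgeSeq pos l
    | some (dx, dy) =>
      if |pos.1 + dx| ≤ 5 ∧ |pos.2 + dy| ≤ 5 then
        canonEdge pos (pos.1 + dx, pos.2 + dy) :: edgeSeq (pos.1 + dx, pos.2 + dy) l
      else edgeSeq pos l

-- the invariant relating A's state to the bridge pass's state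
def StInv (sa : PySem.Set (Int × Int × Int × Int) × (Int × Int) × Int)
    (sb : PySem.Set ((Int × Int) × (Int × Int)) × (Int × Int)) : Prop :=
  sa.2.1 = sb.2 ∧ sa.2.2 = (sb.1.length : Int) ∧
    ∀ p q : Int × Int, (p.1, p.2, q.1, q.2) ∈ sa.1 ↔ canonEdge p q ∈ sb.1

lemma step_inv (sa : PySem.Set (Int × Int × Int × Int) × (Int × Int) × Int)
    (sb : PySem.Set ((Int × Int) × (Int × Int)) × (Int × Int)) (c : Char)
    (h : StInv sa sb) : StInv (stepA sa c) (stepC sb c) := by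
  obtain ⟨hpos, hlen, hmem⟩ := h
  unfold stepA stepC
  cases hmg : moveGet c with
  | none => exact ⟨hpos, hlen, hmem⟩
  | some dxy =>
    obtain ⟨dx, dy⟩ := dxy
    simp only
    have hx : sa.2.1.1 = sb.2.1 := by rw [hpos]
    have hy : sa.2.1.2 = sb.2.2 := by rw [hpos]
    rw [hx, hy]
    set x := sb.2.1
    set y := sb.2.2
    have habs : (|x + dx| ≤ 5 ∧ |y + dy| ≤ 5) ↔
        ¬ (x + dx > 5 ∨ x + dx < -5 ∨ y + dy > 5 ∨ y + dy < -5) := by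
      simp only [abs_le]
      omega
    by_cases hb : x + dx > 5 ∨ x + dx < -5 ∨ y + dy > 5 ∨ y + dy < -5
    · rw [if_pos hb, if_neg (fun h => (habs.mp h) hb)]
      exact ⟨hpos, hlen, hmem⟩
    · rw [if_neg hb, if_pos (habs.mpr hb)]
      have hquad := hmem (x, y) (x + dx, y + dy)
      have hquad' := hmem (x + dx, y + dy) (x, y)
      rw [canonEdge_comm] at hquad'
      have hsb2 : sb.2 = (x, y) := rfl
      by_cases hv : (x, y, x + dx, y + dy) ∈ sa.1 ∨ (x + dx, y + dy, x, y) ∈ sa.1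
      · rw [if_pos hv]
        have he : canonEdge (x, y) (x + dx, y + dy) ∈ sb.1 := by
          rcases hv with hv | hv
          · exact hquad.mp hv
          · exact hquad'.mp hv
        rw [hsb2] at *
        refine ⟨rfl, ?_, ?_⟩
        · simp only [PySem.Set.add_of_mem he, hlen]
        · intro p q
          simp only [PySem.Set.add_of_mem he]
          exact hmem p q
      · have he : canonEdge (x, y) (x + dx, y + dy) ∉ sb.1 := fun hin =>
          hv (Or.inl (hquad.mpr hin))
        rw [if_neg hv, hsb2] at *
        refine ⟨rfl, ?_, ?_⟩
        · rw [PySem.Set.add_of_not_mem he, hlen]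
          simp
        · intro p q
          rw [PySem.Set.mem_add, PySem.Set.mem_add, PySem.Set.mem_add]
          constructor
          · rintro ((hin | h1) | h2)
            · exact Or.inl ((hmem p q).mp hin)
            · refine Or.inr ((canonEdge_eq_iff p q (x, y) (x + dx, y + dy)).mpr (Or.inl ?_))
              obtain ⟨p1, p2⟩ := p; obtain ⟨q1, q2⟩ := q
              simp_all [Prod.ext_iff]
            · refine Or.inr ((canonEdge_eq_iff p q (x, y) (x + dx, y + dy)).mpr (Or.inr ?_))
              obtain ⟨p1, p2⟩ := p; obtain ⟨q1, q2⟩ := q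
              simp_all [Prod.ext_iff]
          · rintro (hin | hc)
            · exact Or.inl (Or.inl ((hmem p q).mpr hin))
            · rw [canonEdge_eq_iff] at hc
              rcases hc with ⟨hp, hq⟩ | ⟨hp, hq⟩
              · subst hp; subst hq; exact Or.inl (Or.inr rfl)
              · subst hp; subst hq; exact Or.inr rfl

lemma foldl_inv (l : List Char)
    (sa : PySem.Set (Int × Int × Int × Int) × (Int × Int) × Int)
    (sb : PySem.Set ((Int × Int) × (Int × Int)) × (Int × Int))
    (h : StInv sa sb) : StInv (l.foldl stepA sa) (l.foldl stepC sb) := by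
  induction l generalizing sa sb with
  | nil => exact h
  | cons c l ih => exact ih _ _ (step_inv _ _ c h)

-- the bridge pass unfolds to folding Set.add over the canonical-edge sequence
lemma foldl_stepC (l : List Char) (S : PySem.Set ((Int × Int) × (Int × Int)))
    (pos : Int × Int) :
    l.foldl stepC (S, pos) = ((edgeSeq pos l).foldl PySem.Set.add S, l.foldl nextP pos) := by
  induction l generalizing S pos with
  | nil => rfl
  | cons c l ih =>
    simp only [List.foldl_cons, edgeSeq, stepC, nextP]
    cases hmg : moveGet c with
    | none => exact ih S pos
    | some dxy =>
      obtain ⟨dx, dy⟩ := dxy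
      simp only
      by_cases hb : |pos.1 + dx| ≤ 5 ∧ |pos.2 + dy| ≤ 5
      · simp only [if_pos hb, List.foldl_cons]
        exact ih _ _
      · simp only [if_neg hb]
        exact ih S pos

-- the trajectory produced by phase 1 of B
def traj (pos : Int × Int) : List Char → List (Int × Int)
  | [] => []
  | c :: l =>
    match moveGet c with
    | none => traj pos l
    | some _ => nextP pos c :: traj (nextP pos c) l

lemma moveGetB_eq : moveGetB = moveGet := rfl

lemma foldl_pathStep (l : List Char) (acc : List (Int × Int)) (pos : Int × Int) :
    l.foldl pathStep (acc ++ [pos]) = (acc ++ [pos]) ++ traj pos l := by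
  induction l generalizing acc pos with
  | nil => simp [traj]
  | cons c l ih =>
    simp only [List.foldl_cons, pathStep, traj, moveGetB_eq]
    cases hmg : moveGet c with
    | none => exact ih acc pos
    | some dxy =>
      obtain ⟨dx, dy⟩ := dxy
      simp only [List.getLastD_concat]
      have hn : nextP pos c =
          if |pos.1 + dx| ≤ 5 ∧ |pos.2 + dy| ≤ 5 then (pos.1 + dx, pos.2 + dy) else pos := by
        simp [nextP, hmg]
      by_cases hb : |pos.1 + dx| ≤ 5 ∧ |pos.2 + dy| ≤ 5
      · rw [if_pos hb]
        have := ih (acc ++ [pos]) (pos.1 + dx, pos.2 + dy)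
        rw [List.append_assoc] at this ⊢
        rw [this, hn, if_pos hb]
        simp
      · rw [if_neg hb]
        have := ih (acc ++ [pos]) pos
        rw [List.append_assoc] at this ⊢
        rw [this, hn, if_neg hb]
        simp

-- a legal step always changes the position
lemma move_ne (pos : Int × Int) (dx dy : Int) (c : Char) (hmg : moveGet c = some (dx, dy)) :
    pos ≠ (pos.1 + dx, pos.2 + dy) := by
  unfold moveGet at hmg
  obtain ⟨a, b⟩ := pos
  split_ifs at hmg <;> simp_all [Prod.ext_iff] <;> omega

-- phase 2 of B over the trajectory yields exactly the canonical-edge sequence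
lemma edges_of_traj (l : List Char) (pos : Int × Int) :
    (((pos :: traj pos l).zip (traj pos l)).filter (fun e => e.1 ≠ e.2)).map
      (fun e => canonEdge e.1 e.2) = edgeSeq pos l := by
  induction l generalizing pos with
  | nil => rfl
  | cons c l ih =>
    simp only [traj, edgeSeq]
    cases hmg : moveGet c with
    | none => exact ih pos
    | some dxy =>
      obtain ⟨dx, dy⟩ := dxy
      simp only
      have hn : nextP pos c =
          if |pos.1 + dx| ≤ 5 ∧ |pos.2 + dy| ≤ 5 then (pos.1 + dx, pos.2 + dy) else pos := by
        simp [nextP, hmg]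
      by_cases hb : |pos.1 + dx| ≤ 5 ∧ |pos.2 + dy| ≤ 5
      · rw [if_pos hb, hn, if_pos hb]
        simp only [List.zip_cons_cons, List.filter_cons]
        rw [if_pos (by simpa using move_ne pos dx dy c hmg)]
        simp only [List.map_cons]
        rw [ih (pos.1 + dx, pos.2 + dy)]
      · rw [if_neg hb, hn, if_neg hb]
        simp only [List.zip_cons_cons, List.filter_cons]
        rw [if_neg (by simp)]
        exact ih pos

-- ===== VERDICT (by name: the statement is the Claim_ definition above) =====
theorem solution_spec : Claim_equal_solution := by
  intro dirs _ _
  unfold Spec_solution solution solution_alt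
  have hA := foldl_inv dirs.toList (PySem.Set.empty, (0, 0), 0) (PySem.Set.empty, (0, 0))
    ⟨rfl, rfl, by intro p q; simp [PySem.Set.empty]⟩
  have hC := foldl_stepC dirs.toList PySem.Set.empty (0, 0)
  have hP := foldl_pathStep dirs.toList [] ((0 : Int), (0 : Int))
  simp only [List.nil_append] at hP
  have hE := edges_of_traj dirs.toList ((0 : Int), (0 : Int))
  simp only [hP, List.singleton_append, List.tail_cons]
  rw [hA.2.1, hC]
  simp only [PySem.Set.ofList_eq_foldl, PySem.Set.empty]
  rw [hE]
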